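-- pv_equiv track=rewrite | github.com/AnnaGalieva1/Python_Task | seminar3/s3_task5.py | fibonacci_list
-- ===== SOURCE A (Python) =====
-- def fibonacci_list(n):
--     fibonacci_numbers = []
--     a, b = 1, 1
--     for i in range(n):
--         fibonacci_numbers.append(a)
--         a, b = b, a + b
--     a, b = 0, 1
--     for i in range(0, n + 1):
--         fibonacci_numbers.insert(0, a)
--         a, b = b, a - b
--     return fibonacci_numbers
-- ===== SOURCE B (Python) =====
-- def fibonacci_list(n):
--     if n < 0:
--         return []
--     f = []
--     a, b = 0, 1
--     for _ in range(n + 1):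
--         f.append(a)
--         a, b = b, a + b
--     left = [f[k] if k % 2 == 1 else -f[k] for k in range(n, 0, -1)]
--     return left + f
-- ===== Notes on version B (the rewrite author's own statement) =====
-- stated objective: alternative
-- what changed: B runs one forward non-negative Fibonacci loop and derives the negative-index half by the sign-reflection identity F(-k)=(-1)^(k+1)F(k) applied to the already-built list, instead of A's separate downward recurrence with repeated insert(0,...) at the list front.
import Mathlib
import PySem

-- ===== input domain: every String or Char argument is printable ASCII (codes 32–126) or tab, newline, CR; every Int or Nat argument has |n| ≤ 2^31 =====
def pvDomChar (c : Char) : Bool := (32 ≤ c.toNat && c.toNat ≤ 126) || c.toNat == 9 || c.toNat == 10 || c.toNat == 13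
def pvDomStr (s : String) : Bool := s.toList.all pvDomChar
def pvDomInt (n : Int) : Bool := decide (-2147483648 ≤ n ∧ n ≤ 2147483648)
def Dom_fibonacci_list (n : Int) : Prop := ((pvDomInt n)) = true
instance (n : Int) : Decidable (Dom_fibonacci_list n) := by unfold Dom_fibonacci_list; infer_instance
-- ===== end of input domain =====

-- B replaces A's separate downward insert(0,..) recurrence by a sign-reflection (F(-k) = (-1)^(k+1) F(k)) of the forward-built list (alternative decomposition).

-- ===== PORT A =====
def fibonacci_list (n : Int) : List Int :=
  -- fibonacci_numbers = []; a, b = 1, 1; for i in range(n): append(a); a, b = b, a + b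
  let s1 := (PySem.List.pyRange 0 n 1).foldl
      (fun (st : List Int × Int × Int) _ => (st.1 ++ [st.2.1], st.2.2, st.2.1 + st.2.2))
      ([], 1, 1)
  -- a, b = 0, 1; for i in range(0, n + 1): insert(0, a); a, b = b, a - b
  let s2 := (PySem.List.pyRange 0 (n + 1) 1).foldl
      (fun (st : List Int × Int × Int) _ => (st.2.1 :: st.1, st.2.2, st.2.1 - st.2.2))
      (s1.1, 0, 1)
  s2.1

-- ===== PORT B =====
def fibonacci_list_alt (n : Int) : List Int :=
  if n < 0 then []
  else
    -- f = []; a, b = 0, 1; for _ in range(n + 1): f.append(a); a, b = b, a + b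
    let s := (PySem.List.pyRange 0 (n + 1) 1).foldl
        (fun (st : List Int × Int × Int) _ => (st.1 ++ [st.2.1], st.2.2, st.2.1 + st.2.2))
        ([], 0, 1)
    let f := s.1
    -- left = [f[k] if k % 2 == 1 else -f[k] for k in range(n, 0, -1)]
    -- f[k] is always in range here (1 ≤ k ≤ n < len f), so pyGetD is exact for Python's f[k]
    let left := (PySem.List.pyRange n 0 (-1)).map
        (fun k => if PySem.Int.mod k 2 == 1 then PySem.List.pyGetD f k 0 else -(PySem.List.pyGetD f k 0))
    left ++ f

-- ===== PRECONDITION & SPEC =====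
def Spec_fibonacci_list (n : Int) (out : List Int) : Prop := out = fibonacci_list_alt n
instance (n : Int) (out : List Int) : Decidable (Spec_fibonacci_list n out) := by unfold Spec_fibonacci_list; infer_instance

-- ===== CLAIM (what is proved, stated in full; the proofs are below) =====
def Claim_equal_fibonacci_list : Prop := ∀ (n : Int), Dom_fibonacci_list n → Spec_fibonacci_list n (fibonacci_list n)

-- ===== LEMMAS AND PROOFS =====

def pvFib : Nat → Int
  | 0 => 0
  | 1 => 1
  | k + 2 => pvFib k + pvFib (k + 1)

def pvG (k : Nat) : Int := if k % 2 = 1 then pvFib k else -(pvFib k)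

lemma pvG_rec (j : Nat) : pvG j - pvG (j+1) = pvG (j+2) := by
  have hf : pvFib (j+2) = pvFib j + pvFib (j+1) := rfl
  by_cases h : j % 2 = 1
  · have h1 : (j+1) % 2 ≠ 1 := by omega
    have h2 : (j+2) % 2 = 1 := by omega
    simp [pvG, h, h1, h2, hf]
    try ring
  · have h1 : (j+1) % 2 = 1 := by omega
    have h2 : ¬ ((j+2) % 2 = 1) := by omega
    simp [pvG, h, h1, h2, hf]
    try ring

lemma pvFwd (ls : List Int) (l : List Int) (i : Nat) :
    ls.foldl (fun (st : List Int × Int × Int) _ => (st.1 ++ [st.2.1], st.2.2, st.2.1 + st.2.2))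
      (l, pvFib i, pvFib (i+1))
    = (l ++ (List.range ls.length).map (fun t => pvFib (i+t)), pvFib (i+ls.length), pvFib (i+ls.length+1)) := by
  induction ls generalizing l i with
  | nil => simp
  | cons x xs ih =>
    simp only [List.foldl_cons]
    have hstep : pvFib i + pvFib (i+1) = pvFib (i+1+1) := rfl
    rw [hstep, ih (l ++ [pvFib i]) (i+1)]
    simp only [Prod.mk.injEq]
    refine ⟨?_, by congr 1; simp; omega, by congr 1; simp; omega⟩
    simp [List.range_succ_eq_map, List.map_map, Function.comp, List.append_assoc]
    intro a _; congr 1; omega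

lemma pvBwd (ls : List Int) (l : List Int) (j : Nat) :
    ls.foldl (fun (st : List Int × Int × Int) _ => (st.2.1 :: st.1, st.2.2, st.2.1 - st.2.2))
      (l, pvG j, pvG (j+1))
    = ((List.range ls.length).reverse.map (fun t => pvG (j+t)) ++ l, pvG (j+ls.length), pvG (j+ls.length+1)) := by
  induction ls generalizing l j with
  | nil => simp
  | cons x xs ih =>
    simp only [List.foldl_cons]
    rw [pvG_rec j, ih (pvG j :: l) (j+1)]
    simp only [Prod.mk.injEq]
    refine ⟨?_, by congr 1; simp; omega, by congr 1; simp; omega⟩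
    simp [List.range_succ_eq_map, List.map_map, Function.comp, List.append_assoc]
    intro a _; congr 1; omega


lemma pvA_char (m : Nat) : fibonacci_list (m : Int) =
    ((List.range (m+1)).reverse.map pvG) ++ (List.range m).map (fun t => pvFib (1+t)) := by
  show ((PySem.List.pyRange 0 ((m:Int) + 1) 1).foldl _
      (((PySem.List.pyRange 0 (m:Int) 1).foldl _ ([], 1, 1)).1, 0, 1)).1 = _
  rw [show (( ([] : List Int), (1:Int), (1:Int)) ) = (([] : List Int), pvFib 1, pvFib (1+1)) from rfl]
  rw [pvFwd]
  rw [show ((0:Int), (1:Int)) = (pvG 0, pvG (0+1)) from rfl]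
  rw [pvBwd]
  simp [PySem.List.length_pyRange_one]

lemma pvB_char (m : Nat) : fibonacci_list_alt (m : Int) =
    ((List.range m).map (fun t => pvG (m - t))) ++ (List.range (m+1)).map pvFib := by
  show (if (m:Int) < 0 then [] else _) = _
  rw [if_neg (by omega)]
  show ((PySem.List.pyRange (m:Int) 0 (-1)).map _) ++
      ((PySem.List.pyRange 0 ((m:Int)+1) 1).foldl _ ([], 0, 1)).1 = _
  rw [show (( ([] : List Int), (0:Int), (1:Int)) ) = (([] : List Int), pvFib 0, pvFib (0+1)) from rfl]
  rw [pvFwd, PySem.List.pyRange_neg_one]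
  simp only [PySem.List.length_pyRange_one]
  congr 1
  · -- left half: map over the countdown range equals map (pvG (m - t)) over range m
    rw [List.map_map]
    apply List.map_congr_left
    intro t ht
    simp only [List.mem_range] at ht
    have ht' : t < m := by omega
    have hcast : (m:Int) - t = ((m - t : Nat) : Int) := by omega
    have hlt : m - t < m + 1 := by omega
    have hget : PySem.List.pyGetD ((List.range (m+1)).map pvFib) ((m:Int)-t) 0 = pvFib (m - t) := by
      rw [hcast, PySem.List.pyGetD_natCast]
      simp [List.getD_eq_getElem?_getD, List.getElem?_range, hlt]
    have hmod : PySem.Int.mod ((m:Int) - t) 2 = (((m - t) % 2 : Nat) : Int) := by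
      rw [PySem.Int.mod_eq_emod_of_pos (by omega), hcast]; omega
    by_cases hp : (m - t) % 2 = 1
    · have hb : (PySem.Int.mod ((m:Int) - t) 2 == 1) = true := by rw [hmod]; simp [hp]
      simp [hb, hget, pvG, hp]
      intro h; exfalso; omega
    · have hb : (PySem.Int.mod ((m:Int) - t) 2 == 1) = false := by rw [hmod]; simp; omega
      simp [hb, hget, pvG, hp]
      intro h; exfalso; omega
  · -- right half: [] ++ map (pvFib (0+t)) = map pvFib
    simp


lemma pvRevRange (j : Nat) : (List.range (j+1)).reverse = (List.range (j+1)).map (fun t => j - t) := by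
  apply List.ext_getElem
  · simp
  · intro i h1 h2
    simp only [List.getElem_reverse, List.getElem_map, List.getElem_range, List.length_range]
    simp only [List.length_range] at h1
    omega

lemma pvCombine (m : Nat) :
    ((List.range (m+1)).reverse.map pvG) ++ (List.range m).map (fun t => pvFib (1+t))
    = ((List.range m).map (fun t => pvG (m - t))) ++ (List.range (m+1)).map pvFib := by
  have hrev : (List.range (m+1)).reverse.map pvG
      = ((List.range m).map (fun t => pvG (m - t))) ++ [pvG 0] := by
    rw [pvRevRange, List.map_map]
    rw [show (List.range (m+1)) = List.range m ++ [m] from List.range_succ]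
    simp [Function.comp]
  have hfib : (List.range (m+1)).map pvFib = pvG 0 :: (List.range m).map (fun t => pvFib (1+t)) := by
    rw [List.range_succ_eq_map, List.map_cons, List.map_map]
    have h0 : pvFib 0 = pvG 0 := by simp [pvG, pvFib]
    rw [h0]
    congr 1
    apply List.map_congr_left
    intro t _
    simp only [Function.comp_apply]
    congr 1
    omega
  rw [hrev, hfib, List.append_assoc]
  simp

lemma pvA_neg (n : Int) (hn : n < 0) : fibonacci_list n = [] := by
  unfold fibonacci_list
  rw [PySem.List.pyRange_one_eq_nil (by omega : n ≤ 0),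
      PySem.List.pyRange_one_eq_nil (by omega : n + 1 ≤ 0)]
  rfl

theorem pv_main (n : Int) : fibonacci_list n = fibonacci_list_alt n := by
  by_cases hn : n < 0
  · rw [pvA_neg n hn]
    unfold fibonacci_list_alt
    rw [if_pos hn]
  · obtain ⟨m, rfl⟩ : ∃ m : Nat, n = (m:Int) := ⟨n.toNat, by omega⟩
    rw [pvA_char, pvB_char, pvCombine]

-- ===== VERDICT (by name: the statement is the Claim_ definition above) =====
theorem fibonacci_list_spec : Claim_equal_fibonacci_list := by
  intro n _
  unfold Spec_fibonacci_list
  exact pv_main n
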